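-- pv_equiv track=rewrite | github.com/VHollund/AoC2020 | Day11/main.py | check_t
-- ===== SOURCE A (Python) =====
-- def check_t(k,y,x): #returns true if lane is open
--     if y == 0:
--         return True
--     for l in range(y-1, -1, -1):
--         if k[l][x] == "#":
--             return False
--         if k[l][x] == "L":
--             return True
--     return True
-- ===== SOURCE B (Python) =====
-- def check_t(k, y, x):  # True iff the first seat above (y-1..0) is not '#'
--     col = ''.join(k[l][x] for l in range(y - 1, -1, -1))
--     h = col.find('#')
--     L = col.find('L')
--     return h == -1 or (L != -1 and L < h)
-- ===== Notes on version B (the rewrite author's own statement) =====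
-- stated objective: simpler
-- what changed: Replaces A's explicit early-return scan up the column (with a special y==0 guard) by materializing the column above as a string and comparing the positions of the first '#' and first 'L' via str.find.
-- outside the precondition, e.g. on check_t(['', '#'], 2, 0): A returns False, B raises IndexError
import Mathlib
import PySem

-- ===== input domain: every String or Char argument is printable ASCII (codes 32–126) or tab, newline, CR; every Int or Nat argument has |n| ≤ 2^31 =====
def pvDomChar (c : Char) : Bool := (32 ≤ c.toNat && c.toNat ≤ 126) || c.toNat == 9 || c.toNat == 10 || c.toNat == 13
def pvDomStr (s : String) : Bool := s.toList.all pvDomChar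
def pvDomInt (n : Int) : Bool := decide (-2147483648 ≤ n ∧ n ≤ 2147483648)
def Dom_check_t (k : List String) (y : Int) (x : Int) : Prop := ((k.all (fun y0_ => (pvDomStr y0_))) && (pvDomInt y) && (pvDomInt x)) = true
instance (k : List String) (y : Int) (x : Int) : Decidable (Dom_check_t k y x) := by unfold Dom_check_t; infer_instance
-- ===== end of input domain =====

-- B replaces A's early-return scan up the column (with its y == 0 guard) by joining the
-- column above into a string and comparing the positions of the first '#' and the first 'L'
-- obtained with str.find; objective: simpler.

-- ===== PORT A =====
-- A's for-loop over range(y-1, -1, -1); k[l][x] is ported as pyGet? ∘ pyGet?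
-- (none = IndexError, an input excluded by Pre_; the loop stops there with an arbitrary value).
def checkTLoopA (k : List String) (x : Int) : List Int → Bool
  | [] => true
  | l :: rest =>
    match (PySem.List.pyGet? k l).bind (fun r => PySem.Str.pyGet? r x) with
    | none => false
    | some c =>
      if c = '#' then false
      else if c = 'L' then true
      else checkTLoopA k x rest

def check_t (k : List String) (y : Int) (x : Int) : Bool :=
  if y = 0 then true
  else checkTLoopA k x (PySem.List.pyRange (y - 1) (-1) (-1))

-- ===== PORT B =====
def check_t_alt (k : List String) (y : Int) (x : Int) : Bool :=
  let col : String := String.ofList ((PySem.List.pyRange (y - 1) (-1) (-1)).map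
    (fun l => ((PySem.List.pyGet? k l).bind (fun r => PySem.Str.pyGet? r x)).getD ' '))
  let h := PySem.Str.find col "#"
  let L := PySem.Str.find col "L"
  h == -1 || (L != -1 && decide (L < h))

-- ===== PRECONDITION & SPEC =====
-- Pre_ excludes inputs where some cell k[l][x] with 0 ≤ l ≤ y-1 is out of range: A raises
-- IndexError there unless it returns early at a '#'/'L' on a lower l, while B always
-- materializes the whole column and raises IndexError.
def Pre_check_t (k : List String) (y : Int) (x : Int) : Prop :=
  0 < y → y ≤ (k.length : Int) ∧ ∀ r ∈ k.take y.toNat, (PySem.Str.pyGet? r x).isSome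
instance (k : List String) (y : Int) (x : Int) : Decidable (Pre_check_t k y x) := by
  unfold Pre_check_t; infer_instance
def pvWitness_check_t : List String × Int × Int := (["L#", ".L"], 2, 1)

def Spec_check_t (k : List String) (y : Int) (x : Int) (out : Bool) : Prop := out = check_t_alt k y x
instance (k : List String) (y : Int) (x : Int) (out : Bool) : Decidable (Spec_check_t k y x out) := by unfold Spec_check_t; infer_instance

-- ===== CLAIM (what is proved, stated in full; the proofs are below) =====
def Claim_equal_check_t : Prop := ∀ (k : List String) (y : Int) (x : Int), Dom_check_t k y x → Pre_check_t k y x → Spec_check_t k y x (check_t k y x)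

-- ===== LEMMAS AND PROOFS =====

-- the abstract character scan performed by A's loop
def pvScan : List Char → Bool
  | [] => true
  | c :: cs => if c = '#' then false else if c = 'L' then true else pvScan cs

-- the two-marker comparison performed by B, over the column's characters
def pvFormula (cs : List Char) : Bool :=
  let h := PySem.Chars.find cs ['#']
  let L := PySem.Chars.find cs ['L']
  h == -1 || (L != -1 && decide (L < h))

theorem pvFind_go_shift (a : Char) (cs : List Char) (kk : Nat) :
    PySem.Chars.find.go [a] cs kk =
      (if PySem.Chars.find cs [a] = -1 then -1 else PySem.Chars.find cs [a] + kk) := by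
  induction cs generalizing kk with
  | nil => simp [PySem.Chars.find, PySem.Chars.find.go]
  | cons c cs ih =>
    simp only [PySem.Chars.find, PySem.Chars.find.go, List.isPrefixOf, Bool.and_true]
    by_cases h : a == c
    · simp [h]
    · have hge := PySem.Chars.neg_one_le_find cs [a]
      simp only [h, ih (kk + 1), ih 1]
      split_ifs <;> push_cast <;> omega

theorem pvFind_cons (c : Char) (cs : List Char) (a : Char) :
    PySem.Chars.find (c :: cs) [a] =
      (if c = a then 0
       else if PySem.Chars.find cs [a] = -1 then -1 else PySem.Chars.find cs [a] + 1) := by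
  have hsh := pvFind_go_shift a cs 1
  simp only [PySem.Chars.find] at hsh ⊢
  rw [show PySem.Chars.find.go [a] (c :: cs) 0
      = (if (a == c) = true then (0:Int) else PySem.Chars.find.go [a] cs 1) from by
    simp only [PySem.Chars.find.go, List.isPrefixOf, Bool.and_true]; norm_num]
  by_cases h : a == c
  · have hc : c = a := (beq_iff_eq.mp h).symm
    rw [if_pos h, if_pos hc]
  · have hc : ¬ c = a := fun hh => h (by simp [hh])
    rw [if_neg h, if_neg hc, hsh]
    push_cast
    rfl

theorem pvScan_eq_formula (cs : List Char) : pvScan cs = pvFormula cs := by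
  induction cs with
  | nil => simp [pvScan, pvFormula, PySem.Chars.find, PySem.Chars.find.go]
  | cons c cs ih =>
    have hH := PySem.Chars.neg_one_le_find cs ['#']
    have hL := PySem.Chars.neg_one_le_find cs ['L']
    simp only [pvScan, pvFormula, pvFind_cons, ih]
    by_cases h1 : c = '#'
    · have h2 : c ≠ 'L' := by subst h1; decide
      simp only [h1, if_true]
      split_ifs <;> rw [Bool.eq_iff_iff] <;> simp <;> omega
    · by_cases h2 : c = 'L'
      · simp only [h2, if_neg h1, if_pos rfl]
        have h3 : ¬ ('L' : Char) = '#' := by decide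
        simp only [if_neg h3]
        split_ifs <;> rw [Bool.eq_iff_iff] <;> simp <;> omega
      · simp only [if_neg h1, if_neg h2]
        split_ifs <;> rw [Bool.eq_iff_iff] <;> simp <;> omega

theorem pvMem_pyRange_down {y l : Int} :
    l ∈ PySem.List.pyRange (y - 1) (-1) (-1) ↔ 0 ≤ l ∧ l < y := by
  simp only [PySem.List.pyRange, if_neg (show ¬ ((-1:Int) = 0) by omega),
    if_neg (show ¬ ((0:Int) < -1) by omega)]
  by_cases hy : (-1:Int) < y - 1
  · rw [if_pos hy, show (y - 1 - -1 + - -1 - 1) / - -1 = y from by norm_num]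
    simp only [List.mem_map, List.mem_range]
    constructor
    · rintro ⟨kk, hk, rfl⟩; omega
    · rintro ⟨h0, h1⟩; exact ⟨(y - 1 - l).toNat, by omega, by omega⟩
  · rw [if_neg hy]
    simp only [List.range_zero, List.map_nil, List.not_mem_nil, false_iff]
    omega

theorem pvPre_isSome (k : List String) (y x : Int) (hpre : Pre_check_t k y x) :
    ∀ l ∈ PySem.List.pyRange (y - 1) (-1) (-1),
      ((PySem.List.pyGet? k l).bind (fun r => PySem.Str.pyGet? r x)).isSome := by
  intro l hl
  obtain ⟨h0, h1⟩ := pvMem_pyRange_down.mp hl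
  obtain ⟨hlen, hrows⟩ := hpre (by omega)
  have hlt : l.toNat < k.length := by omega
  have hkl : PySem.List.pyGet? k l = some k[l.toNat] := by
    have h1 : PySem.List.pyGet? k l = PySem.List.pyGet? k ((l.toNat : Nat) : Int) := by
      congr 1; omega
    rw [h1, PySem.List.pyGet?_natCast]
    exact List.getElem?_eq_getElem hlt
  rw [hkl, Option.bind_some]
  refine hrows _ ?_
  have hmem : (k.take y.toNat)[l.toNat]'(by simp; omega) ∈ k.take y.toNat := List.getElem_mem _
  simpa [List.getElem_take] using hmem

theorem pvLoop_eq_scan (k : List String) (x : Int) (ls : List Int)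
    (h : ∀ l ∈ ls, ((PySem.List.pyGet? k l).bind (fun r => PySem.Str.pyGet? r x)).isSome) :
    checkTLoopA k x ls =
      pvScan (ls.map (fun l => ((PySem.List.pyGet? k l).bind (fun r => PySem.Str.pyGet? r x)).getD ' ')) := by
  induction ls with
  | nil => rfl
  | cons l ls ih =>
    obtain ⟨c, hc⟩ := Option.isSome_iff_exists.mp (h l (List.mem_cons_self ..))
    simp only [checkTLoopA, List.map_cons, pvScan, hc, Option.getD_some]
    split_ifs
    · rfl
    · rfl
    · exact ih (fun l' hm => h l' (List.mem_cons_of_mem _ hm))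

theorem check_t_alt_eq_formula (k : List String) (y : Int) (x : Int) :
    check_t_alt k y x =
      pvFormula ((PySem.List.pyRange (y - 1) (-1) (-1)).map
        (fun l => ((PySem.List.pyGet? k l).bind (fun r => PySem.Str.pyGet? r x)).getD ' ')) := by
  simp [check_t_alt, pvFormula]

-- ===== VERDICT (by name: the statement is the Claim_ definition above) =====
theorem check_t_spec : Claim_equal_check_t := by
  intro k y x _ hpre
  unfold Spec_check_t check_t
  rw [check_t_alt_eq_formula, ← pvScan_eq_formula, ← pvLoop_eq_scan k x _ (pvPre_isSome k y x hpre)]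
  split_ifs with hy
  · subst hy
    simp [PySem.List.pyRange, checkTLoopA]
  · rfl
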